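-- pv_equiv track=rewrite | github.com/renatabravo107246/ATP2024 | projeto/projeto.py | lista_keywords_alfabetica
-- ===== SOURCE A (Python) =====
-- def lista_keywords_alfabetica(data):
--     keywords = []
--     for artigo in data:
--         if "keywords" in artigo.keys():
--             keywords_artigo = artigo["keywords"].split(", ")
--             for keyword in keywords_artigo:
--                 if keyword not in keywords:
--                     keywords.append(keyword)
--     keywords.sort()
--     return keywords
-- ===== SOURCE B (Python) =====
-- def lista_keywords_alfabetica(data):
--     todas = []
--     for artigo in data:
--         if "keywords" in artigo:
--             todas.extend(artigo["keywords"].split(", "))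
--     todas.sort()
--     resultado = []
--     for kw in todas:
--         if not resultado or resultado[-1] != kw:
--             resultado.append(kw)
--     return resultado
-- ===== Notes on version B (the rewrite author's own statement) =====
-- stated objective: alternative
-- what changed: B collects all keywords into one flat list with duplicates, sorts it once, and removes adjacent duplicates in a single linear pass, instead of A's per-keyword membership scan of the growing unique list followed by a final sort.
import Mathlib
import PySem

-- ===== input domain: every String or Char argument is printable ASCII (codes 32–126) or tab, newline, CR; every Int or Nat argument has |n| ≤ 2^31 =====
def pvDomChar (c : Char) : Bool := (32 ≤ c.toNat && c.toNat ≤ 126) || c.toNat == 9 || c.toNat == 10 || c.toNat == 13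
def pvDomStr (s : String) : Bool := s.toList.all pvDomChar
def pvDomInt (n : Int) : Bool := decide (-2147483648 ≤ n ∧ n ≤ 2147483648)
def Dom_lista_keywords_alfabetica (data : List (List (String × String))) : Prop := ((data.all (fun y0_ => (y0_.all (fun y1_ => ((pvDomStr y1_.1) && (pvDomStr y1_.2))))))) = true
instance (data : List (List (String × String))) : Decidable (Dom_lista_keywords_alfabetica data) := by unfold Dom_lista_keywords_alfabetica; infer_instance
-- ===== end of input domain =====

-- B changes the algorithm: one flat collection, one sort, then a linear adjacent-duplicate pass,
-- replacing A's per-keyword membership scan of the growing result list; same return value.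

-- shared helper: artigo["keywords"].split(", ")  (sep = ", " is nonempty, so split? is always `some`)
def pvSplitKw (artigo : List (String × String)) : List String :=
  (PySem.Str.split? ((PySem.Dict.mk artigo).getD "keywords" "") ", ").getD []

-- ===== PORT A =====
def lista_keywords_alfabetica (data : List (List (String × String))) : List String :=
  let keywords := data.foldl (fun kws artigo =>
    if (PySem.Dict.mk artigo).contains "keywords" then
      (pvSplitKw artigo).foldl (fun kws keyword => if keyword ∈ kws then kws else kws ++ [keyword]) kws
    else kws) []
  PySem.List.sorted keywords (fun x => x)

-- ===== PORT B =====
def lista_keywords_alfabetica_alt (data : List (List (String × String))) : List String :=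
  let todas := data.foldl (fun acc artigo =>
    if (PySem.Dict.mk artigo).contains "keywords" then acc ++ pvSplitKw artigo else acc) []
  let sortedT := PySem.List.sorted todas (fun x => x)
  sortedT.foldl (fun res kw => if res = [] ∨ res.getLast? ≠ some kw then res ++ [kw] else res) []

-- ===== PRECONDITION & SPEC =====
def Spec_lista_keywords_alfabetica (data : List (List (String × String))) (out : List String) : Prop := out = lista_keywords_alfabetica_alt data
instance (data : List (List (String × String))) (out : List String) : Decidable (Spec_lista_keywords_alfabetica data out) := by unfold Spec_lista_keywords_alfabetica; infer_instance

-- ===== CLAIM (what is proved, stated in full; the proofs are below) =====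
def Claim_equal_lista_keywords_alfabetica : Prop := ∀ (data : List (List (String × String))), Dom_lista_keywords_alfabetica data → Spec_lista_keywords_alfabetica data (lista_keywords_alfabetica data)

-- ===== LEMMAS AND PROOFS =====

-- keywords contributed by one article
def pvKwsIf (artigo : List (String × String)) : List String :=
  if (PySem.Dict.mk artigo).contains "keywords" then pvSplitKw artigo else []

-- adjacent-duplicate removal given the previously kept element
def pvAdjFrom (p : String) : List String → List String
  | [] => []
  | x :: t => if x = p then pvAdjFrom p t else x :: pvAdjFrom x t

lemma pvKwsIf_pos (artigo : List (String × String)) (h : (PySem.Dict.mk artigo).contains "keywords") :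
    pvKwsIf artigo = pvSplitKw artigo := by simp [pvKwsIf, h]

lemma pvKwsIf_neg (artigo : List (String × String)) (h : ¬ (PySem.Dict.mk artigo).contains "keywords") :
    pvKwsIf artigo = [] := by simp [pvKwsIf, h]

lemma innerA_spec (ks : List String) : ∀ (kws : List String), kws.Nodup →
    (List.foldl (fun kws keyword => if keyword ∈ kws then kws else kws ++ [keyword]) kws ks).Nodup ∧
    ∀ a, a ∈ List.foldl (fun kws keyword => if keyword ∈ kws then kws else kws ++ [keyword]) kws ks ↔ (a ∈ kws ∨ a ∈ ks) := by
  induction ks with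
  | nil => intro kws h; simpa using h
  | cons k t ih =>
    intro kws hnd
    simp only [List.foldl_cons]
    by_cases hk : k ∈ kws
    · simp only [if_pos hk]
      obtain ⟨h1, h2⟩ := ih kws hnd
      refine ⟨h1, fun a => ?_⟩
      rw [h2 a, List.mem_cons]
      constructor
      · rintro (h | h)
        · exact Or.inl h
        · exact Or.inr (Or.inr h)
      · rintro (h | rfl | h)
        · exact Or.inl h
        · exact Or.inl hk
        · exact Or.inr h
    · simp only [if_neg hk]
      have hnd2 : (kws ++ [k]).Nodup := by
        simp only [List.nodup_append, List.nodup_cons, List.not_mem_nil, not_false_iff,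
          List.nodup_nil, and_true, true_and, hnd]
        exact fun a ha b hb => by
          rcases List.mem_singleton.1 hb with rfl
          exact fun h => hk (h ▸ ha)
      obtain ⟨h1, h2⟩ := ih _ hnd2
      refine ⟨h1, fun a => ?_⟩
      rw [h2 a]
      simp only [List.mem_append, List.mem_singleton, List.mem_cons]
      tauto

lemma outerA_spec (data : List (List (String × String))) : ∀ (acc : List String), acc.Nodup →
    (List.foldl (fun kws artigo =>
      if (PySem.Dict.mk artigo).contains "keywords" then
        (pvSplitKw artigo).foldl (fun kws keyword => if keyword ∈ kws then kws else kws ++ [keyword]) kws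
      else kws) acc data).Nodup ∧
    ∀ a, a ∈ List.foldl (fun kws artigo =>
      if (PySem.Dict.mk artigo).contains "keywords" then
        (pvSplitKw artigo).foldl (fun kws keyword => if keyword ∈ kws then kws else kws ++ [keyword]) kws
      else kws) acc data ↔ (a ∈ acc ∨ a ∈ data.flatMap pvKwsIf) := by
  induction data with
  | nil => intro acc h; simpa using h
  | cons artigo rest ih =>
    intro acc hnd
    simp only [List.foldl_cons, List.flatMap_cons]
    by_cases hc : (PySem.Dict.mk artigo).contains "keywords"
    · simp only [if_pos hc]
      obtain ⟨i1, i2⟩ := innerA_spec (pvSplitKw artigo) acc hnd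
      obtain ⟨h1, h2⟩ := ih _ i1
      refine ⟨h1, fun a => ?_⟩
      rw [h2 a, i2 a]
      simp [pvKwsIf, hc, List.mem_append, or_assoc]
    · simp only [if_neg hc]
      obtain ⟨h1, h2⟩ := ih acc hnd
      refine ⟨h1, fun a => ?_⟩
      rw [h2 a]
      simp [pvKwsIf, hc]

lemma loopB_eq (data : List (List (String × String))) : ∀ (acc : List String),
    List.foldl (fun acc artigo =>
      if (PySem.Dict.mk artigo).contains "keywords" then acc ++ pvSplitKw artigo else acc) acc data
    = acc ++ data.flatMap pvKwsIf := by
  induction data with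
  | nil => intro acc; simp
  | cons artigo rest ih =>
    intro acc
    simp only [List.foldl_cons, List.flatMap_cons]
    by_cases hc : (PySem.Dict.mk artigo).contains "keywords"
    · rw [if_pos hc, ih, pvKwsIf_pos artigo hc, List.append_assoc]
    · rw [if_neg hc, ih, pvKwsIf_neg artigo hc, List.nil_append]

lemma foldlB_inv : ∀ (xs acc : List String) (p : String), acc.getLast? = some p →
    List.foldl (fun res kw => if res = [] ∨ res.getLast? ≠ some kw then res ++ [kw] else res) acc xs
      = acc ++ pvAdjFrom p xs := by
  intro xs
  induction xs with
  | nil => intro acc p _; simp [pvAdjFrom]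
  | cons x t ih =>
    intro acc p hl
    have hne : acc ≠ [] := by intro h; simp [h] at hl
    simp only [List.foldl_cons]
    by_cases hx : x = p
    · subst hx
      have : ¬ (acc = [] ∨ acc.getLast? ≠ some x) := by
        push Not; exact ⟨hne, hl⟩
      rw [if_neg this, pvAdjFrom, if_pos rfl]
      exact ih acc x hl
    · have : (acc = [] ∨ acc.getLast? ≠ some x) := by
        right; rw [hl]; simpa using fun h => hx h.symm
      rw [if_pos this, pvAdjFrom, if_neg hx]
      rw [ih (acc ++ [x]) x (by simp), List.append_assoc]
      rfl

lemma pvAdjFrom_mem : ∀ (t : List String) (p a : String), a ∈ p :: pvAdjFrom p t ↔ a ∈ p :: t := by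
  intro t
  induction t with
  | nil => intro p a; simp [pvAdjFrom]
  | cons x t ih =>
    intro p a
    by_cases hx : x = p
    · subst hx
      rw [pvAdjFrom, if_pos rfl, ih]
      simp only [List.mem_cons]
      tauto
    · rw [pvAdjFrom, if_neg hx]
      have := ih x a
      simp only [List.mem_cons] at this ⊢
      tauto

lemma pvAdjFrom_pairwise : ∀ (t : List String) (p : String),
    (p :: t).Pairwise (· ≤ ·) → (p :: pvAdjFrom p t).Pairwise (· < ·) := by
  intro t
  induction t with
  | nil => intro p _; simp [pvAdjFrom]
  | cons x t ih =>
    intro p h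
    rw [List.pairwise_cons] at h
    by_cases hx : x = p
    · subst hx
      rw [pvAdjFrom, if_pos rfl]
      exact ih x h.2
    · rw [pvAdjFrom, if_neg hx]
      have hih := ih x h.2
      have hpx : p < x := lt_of_le_of_ne (h.1 x (List.mem_cons_self)) (Ne.symm hx)
      rw [List.pairwise_cons]
      refine ⟨fun b hb => ?_, hih⟩
      rcases List.mem_cons.1 hb with rfl | hb
      · exact hpx
      · exact lt_trans hpx ((List.pairwise_cons.1 hih).1 b hb)

lemma main_eq (data : List (List (String × String))) :
    lista_keywords_alfabetica data = lista_keywords_alfabetica_alt data := by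
  simp only [lista_keywords_alfabetica, lista_keywords_alfabetica_alt]
  rw [loopB_eq data [], List.nil_append]
  obtain ⟨hKnd, hKmem⟩ := outerA_spec data [] List.nodup_nil
  simp only [List.not_mem_nil, false_or] at hKmem
  rcases hS : PySem.List.sorted (data.flatMap pvKwsIf) (fun x => x) with _ | ⟨x, t⟩
  · -- sorted flat list empty ⇒ no keywords at all ⇒ A's list empty too
    have hF : data.flatMap pvKwsIf = [] := by
      rwa [PySem.List.sorted_eq_nil_iff] at hS
    have hK : (List.foldl (fun kws artigo =>
        if (PySem.Dict.mk artigo).contains "keywords" then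
          (pvSplitKw artigo).foldl (fun kws keyword => if keyword ∈ kws then kws else kws ++ [keyword]) kws
        else kws) [] data) = [] := by
      apply List.eq_nil_iff_forall_not_mem.2
      intro a ha
      rw [hKmem a, hF] at ha
      exact (List.not_mem_nil) ha
    rw [hK]
    simp [PySem.List.sorted]
  · -- nonempty case: B = x :: pvAdjFrom x t
    have hBs : List.foldl (fun res kw => if res = [] ∨ res.getLast? ≠ some kw then res ++ [kw] else res) [] (x :: t)
        = x :: pvAdjFrom x t := by
      rw [List.foldl_cons, if_pos (Or.inl rfl), List.nil_append,
        foldlB_inv t [x] x (by simp)]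
      rfl
    rw [hBs]
    -- the sorted flat list is ≤-pairwise, so B's result is <-pairwise
    have hpw : (x :: t).Pairwise (· ≤ ·) := by
      have := PySem.List.sorted_pairwise (data.flatMap pvKwsIf) (fun x => x)
      rwa [hS] at this
    have hRpw : (x :: pvAdjFrom x t).Pairwise (· < ·) := pvAdjFrom_pairwise t x hpw
    have hRnd : (x :: pvAdjFrom x t).Nodup := hRpw.imp (fun h => ne_of_lt h)
    -- same element sets, both duplicate-free ⇒ permutation ⇒ sorting A's list gives B's result
    have hmemF : ∀ a, a ∈ (x :: t) ↔ a ∈ data.flatMap pvKwsIf := by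
      intro a
      rw [← hS]
      exact (PySem.List.sorted_perm (data.flatMap pvKwsIf) (fun x => x) false).mem_iff
    have hperm : (x :: pvAdjFrom x t).Perm (List.foldl (fun kws artigo =>
        if (PySem.Dict.mk artigo).contains "keywords" then
          (pvSplitKw artigo).foldl (fun kws keyword => if keyword ∈ kws then kws else kws ++ [keyword]) kws
        else kws) [] data) := by
      rw [List.perm_ext_iff_of_nodup hRnd hKnd]
      intro a
      rw [hKmem a, ← hmemF a, pvAdjFrom_mem t x a]
    exact PySem.List.sorted_eq_of_perm_of_pairwise_lt _ _ (fun x => x) hperm hRpw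

-- ===== VERDICT (by name: the statement is the Claim_ definition above) =====
theorem lista_keywords_alfabetica_spec : Claim_equal_lista_keywords_alfabetica := by
  intro data _
  exact main_eq data
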